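-- pv_equiv track=rewrite | github.com/georgexrysiko/ComputerScienceProject | askisi2.py | smallTobig
-- ===== SOURCE A (Python) =====
-- row  = box = ring_size = 3
--
-- row  = box = ring_size = 3
--
-- def smallTobig(table):
--     win = victory()
--     #horizontal
--     for i in range(row):
--         if table[i][0][0] == table[i][1][1] == table[i][2][2] == True:
--             return True
--         elif table[i][0][2] == table[i][1][1] == table[i][2][0] == True:
--             return True
--     #vertical
--     for i in range(box):
--         if table[0][i][0] == table[1][i][1] == table[2][i][2] == True:
--             return True
--         elif table[0][i][2] == table[1][i][1] == table[2][i][0] == True: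
--             return True
--     #diagonal
--     if table[0][0][0] == table[1][1][1] == table[2][2][2] == True:
--         return True
--     elif table[0][0][2] == table[1][1][1] == table[2][2][0] == True:
--         return True
--     elif table[2][0][2] == table[1][1][1] == table[0][2][0] == True:
--         return True
--     elif table[2][0][0] == table[1][1][1] == table[0][2][2] == True:
--         return True
--     return win
--
-- def victory():
--     win = False
--     return win
-- ===== SOURCE B (Python) =====
-- # B: reduce 3D to 2D — view the board through four coordinate projections
-- # (the third index tracking +/- the row or column index) and apply one
-- # generic 2D win check (rows + both diagonals) to each view.
--
-- def _wins2d(v):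
--     if any(all(v(r, c) for c in range(3)) for r in range(3)):
--         return True
--     if all(v(t, t) for t in range(3)):
--         return True
--     return all(v(t, 2 - t) for t in range(3))
--
-- def smallTobig(table):
--     def cell(i, j, k):
--         return table[i][j][k] == True
--     views = [lambda r, c: cell(r, c, c), lambda r, c: cell(r, c, 2 - c),
--              lambda r, c: cell(c, r, c), lambda r, c: cell(c, r, 2 - c)]
--     return any(_wins2d(v) for v in views)
-- ===== Notes on version B (the rewrite author's own statement) =====
-- stated objective: alternative
-- what changed: Instead of A's three unrolled blocks of hard-coded triple-equality chains over 3D cells, B reduces the problem to 2D: it views the board through four coordinate projections (third index tracking +/- the row or column index) and applies one generic 2D win check (rows plus both diagonals) to each view.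
import Mathlib
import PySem

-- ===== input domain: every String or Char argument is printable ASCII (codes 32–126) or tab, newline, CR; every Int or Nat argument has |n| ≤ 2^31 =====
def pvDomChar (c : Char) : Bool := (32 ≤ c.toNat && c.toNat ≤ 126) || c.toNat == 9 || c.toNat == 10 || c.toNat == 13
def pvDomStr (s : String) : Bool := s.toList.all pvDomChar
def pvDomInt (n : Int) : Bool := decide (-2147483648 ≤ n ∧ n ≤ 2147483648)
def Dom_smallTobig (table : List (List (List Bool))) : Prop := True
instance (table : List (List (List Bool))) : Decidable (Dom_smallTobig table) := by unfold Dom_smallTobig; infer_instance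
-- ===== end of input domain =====

-- B reuses a generic 2D win check on four coordinate views of the 3D board instead
-- of A's unrolled hard-coded line checks (objective: alternative); the ports agree
-- on every input, and Pre_ delimits where both Pythons return normally.

-- ===== PORT A =====
-- table[i][j][k]; exact on Pre_smallTobig, where every index dereferenced is in range.
def pvCell (table : List (List (List Bool))) (i j k : Int) : Bool :=
  PySem.List.pyGetD (PySem.List.pyGetD (PySem.List.pyGetD table i []) j []) k false

-- the 'for i in range(row)' horizontal loop; true = the loop hit a 'return True'
def pvAHoriz (table : List (List (List Bool))) : List Int → Bool
  | [] => false
  | i :: rest =>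
    if pvCell table i 0 0 && pvCell table i 1 1 && pvCell table i 2 2 then true
    else if pvCell table i 0 2 && pvCell table i 1 1 && pvCell table i 2 0 then true
    else pvAHoriz table rest

-- the 'for i in range(box)' vertical loop
def pvAVert (table : List (List (List Bool))) : List Int → Bool
  | [] => false
  | i :: rest =>
    if pvCell table 0 i 0 && pvCell table 1 i 1 && pvCell table 2 i 2 then true
    else if pvCell table 0 i 2 && pvCell table 1 i 1 && pvCell table 2 i 0 then true
    else pvAVert table rest

def smallTobig (table : List (List (List Bool))) : Bool :=
  let win := false
  if pvAHoriz table (PySem.List.pyRange 0 3 1) then true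
  else if pvAVert table (PySem.List.pyRange 0 3 1) then true
  else if pvCell table 0 0 0 && pvCell table 1 1 1 && pvCell table 2 2 2 then true
  else if pvCell table 0 0 2 && pvCell table 1 1 1 && pvCell table 2 2 0 then true
  else if pvCell table 2 0 2 && pvCell table 1 1 1 && pvCell table 0 2 0 then true
  else if pvCell table 2 0 0 && pvCell table 1 1 1 && pvCell table 0 2 2 then true
  else win

-- ===== PORT B =====
-- Source B's cell: table[i][j][k] == True; pyGet? is none exactly where the Python
-- indexing raises IndexError (only inputs where no read is out of range are admitted)
def pvCellB (table : List (List (List Bool))) (i j k : Int) : Bool :=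
  match PySem.List.pyGet? table i with
  | none => false
  | some r =>
    match PySem.List.pyGet? r j with
    | none => false
    | some q =>
      match PySem.List.pyGet? q k with
      | none => false
      | some b => b == true

-- generic 2D checker over a view function: any full row, main diagonal, anti-diagonal
def pvWins2d (v : Int → Int → Bool) : Bool :=
  if (PySem.List.pyRange 0 3 1).any (fun r => (PySem.List.pyRange 0 3 1).all (fun c => v r c))
    then true
  else if (PySem.List.pyRange 0 3 1).all (fun t => v t t) then true
  else (PySem.List.pyRange 0 3 1).all (fun t => v t (2 - t))

def smallTobig_alt (table : List (List (List Bool))) : Bool :=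
  [fun r c => pvCellB table r c c, fun r c => pvCellB table r c (2 - c),
   fun r c => pvCellB table c r c, fun r c => pvCellB table c r (2 - c)].any pvWins2d

-- ===== PRECONDITION & SPEC =====
-- A's 16 hard-coded lines, in the order its code inspects them
def pvALines : List ((Nat × Nat × Nat) × (Nat × Nat × Nat) × (Nat × Nat × Nat)) :=
  [ ((0, 0, 0), (0, 1, 1), (0, 2, 2)), ((0, 0, 2), (0, 1, 1), (0, 2, 0)),
    ((1, 0, 0), (1, 1, 1), (1, 2, 2)), ((1, 0, 2), (1, 1, 1), (1, 2, 0)),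
    ((2, 0, 0), (2, 1, 1), (2, 2, 2)), ((2, 0, 2), (2, 1, 1), (2, 2, 0)),
    ((0, 0, 0), (1, 0, 1), (2, 0, 2)), ((0, 0, 2), (1, 0, 1), (2, 0, 0)),
    ((0, 1, 0), (1, 1, 1), (2, 1, 2)), ((0, 1, 2), (1, 1, 1), (2, 1, 0)),
    ((0, 2, 0), (1, 2, 1), (2, 2, 2)), ((0, 2, 2), (1, 2, 1), (2, 2, 0)),
    ((0, 0, 0), (1, 1, 1), (2, 2, 2)), ((0, 0, 2), (1, 1, 1), (2, 2, 0)),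
    ((2, 0, 2), (1, 1, 1), (0, 2, 0)), ((2, 0, 0), (1, 1, 1), (0, 2, 2)) ]

-- c is a readable index triple; 'drop n ≠ []' is 'n < length' that a checker
-- evaluates without measuring the whole (possibly long) list
def pvOkN (t : List (List (List Bool))) (c : Nat × Nat × Nat) : Bool :=
  !(t.drop c.1).isEmpty && !((t.getD c.1 []).drop c.2.1).isEmpty &&
    !(((t.getD c.1 []).getD c.2.1 []).drop c.2.2).isEmpty

def pvValN (t : List (List (List Bool))) (c : Nat × Nat × Nat) : Bool :=
  ((t.getD c.1 []).getD c.2.1 []).getD c.2.2 false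

-- a line's reads are in range: the first two cells always, the third only when
-- the first two compare equal (Python's chained == short-circuits otherwise)
def pvLineOk (t : List (List (List Bool)))
    (l : (Nat × Nat × Nat) × (Nat × Nat × Nat) × (Nat × Nat × Nat)) : Bool :=
  pvOkN t l.1 && pvOkN t l.2.1 && (!(pvValN t l.1 == pvValN t l.2.1) || pvOkN t l.2.2)

def pvLineWin (t : List (List (List Bool)))
    (l : (Nat × Nat × Nat) × (Nat × Nat × Nat) × (Nat × Nat × Nat)) : Bool :=
  [l.1, l.2.1, l.2.2].all (fun c => pvOkN t c && pvValN t c)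

-- the 24 lines B's scan inspects, in B's evaluation order (rows, diagonal,
-- anti-diagonal of each of the four views)
def pvBLines : List ((Nat × Nat × Nat) × (Nat × Nat × Nat) × (Nat × Nat × Nat)) :=
  [ ((0, 0, 0), (0, 1, 1), (0, 2, 2)), ((1, 0, 0), (1, 1, 1), (1, 2, 2)),
    ((2, 0, 0), (2, 1, 1), (2, 2, 2)), ((0, 0, 0), (1, 1, 1), (2, 2, 2)),
    ((0, 2, 2), (1, 1, 1), (2, 0, 0)),
    ((0, 0, 2), (0, 1, 1), (0, 2, 0)), ((1, 0, 2), (1, 1, 1), (1, 2, 0)),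
    ((2, 0, 2), (2, 1, 1), (2, 2, 0)), ((0, 0, 2), (1, 1, 1), (2, 2, 0)),
    ((0, 2, 0), (1, 1, 1), (2, 0, 2)),
    ((0, 0, 0), (1, 0, 1), (2, 0, 2)), ((0, 1, 0), (1, 1, 1), (2, 1, 2)),
    ((0, 2, 0), (1, 2, 1), (2, 2, 2)), ((0, 0, 0), (1, 1, 1), (2, 2, 2)),
    ((2, 0, 2), (1, 1, 1), (0, 2, 0)),
    ((0, 0, 2), (1, 0, 1), (2, 0, 0)), ((0, 1, 2), (1, 1, 1), (2, 1, 0)),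
    ((0, 2, 2), (1, 2, 1), (2, 2, 0)), ((0, 0, 2), (1, 1, 1), (2, 2, 0)),
    ((2, 0, 0), (1, 1, 1), (0, 2, 2)) ]

-- a B-line's reads are in range: all() stops at the first False, so each later
-- cell is read only while the earlier ones were True
def pvLineOkB (t : List (List (List Bool)))
    (l : (Nat × Nat × Nat) × (Nat × Nat × Nat) × (Nat × Nat × Nat)) : Bool :=
  pvOkN t l.1 && (!pvValN t l.1 || (pvOkN t l.2.1 && (!pvValN t l.2.1 || pvOkN t l.2.2)))

-- Pre_ is exactly where BOTH Pythons return: every line either scan inspects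
-- before its first winning line has its short-circuited reads in range.  It
-- excludes inputs on which A still returns but B's differently-ordered scan
-- hits a missing cell and raises IndexError (cited in claim.json).
def Pre_smallTobig (table : List (List (List Bool))) : Prop :=
  (∀ n ∈ List.range 16,
    (List.range n).all (fun m => !pvLineWin table (pvALines.getD m default)) = true →
      pvLineOk table (pvALines.getD n default) = true) ∧
  (∀ n ∈ List.range 20,
    (List.range n).all (fun m => !pvLineWin table (pvBLines.getD m default)) = true →
      pvLineOkB table (pvBLines.getD n default) = true)
instance (table : List (List (List Bool))) : Decidable (Pre_smallTobig table) := by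
  unfold Pre_smallTobig; infer_instance

def pvWitness_smallTobig : List (List (List Bool)) :=
  [ [[false, false, false], [false, false, false], [false, false, false]],
    [[false, false, false], [false, false, false], [false, false, false]],
    [[false, false, false], [false, false, false], [false, false, false]] ]

def Spec_smallTobig (table : List (List (List Bool))) (out : Bool) : Prop := out = smallTobig_alt table
instance (table : List (List (List Bool))) (out : Bool) : Decidable (Spec_smallTobig table out) := by unfold Spec_smallTobig; infer_instance

-- ===== CLAIM =====
def Claim_equal_smallTobig : Prop := ∀ (table : List (List (List Bool))), Dom_smallTobig table → Pre_smallTobig table → Spec_smallTobig table (smallTobig table)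

-- ===== LEMMAS AND PROOFS =====
-- an if-chain link returning true is a disjunction
-- B's guarded read equals the defaulting read used to state A's cells
theorem pvCellB_eq (t : List (List (List Bool))) (i j k : Int) :
    pvCellB t i j k = pvCell t i j k := by
  have hD : ∀ {α : Type} (xs : List α) (n : Int) (d : α),
      PySem.List.pyGetD xs n d = (PySem.List.pyGet? xs n).getD d := by
    intro α xs n d; simp [PySem.List.pyGetD]
  have hN2 : ∀ (n : Int), PySem.List.pyGet? ([] : List (List Bool)) n = none := by
    intro n; simp [PySem.List.pyGet?, PySem.List.pyIdx?]
  have hN1 : ∀ (n : Int), PySem.List.pyGet? ([] : List Bool) n = none := by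
    intro n; simp [PySem.List.pyGet?, PySem.List.pyIdx?]
  unfold pvCellB pvCell
  rw [hD t i]
  cases hi : PySem.List.pyGet? t i with
  | none => simp [hD, hN1, hN2]
  | some r =>
    simp only [Option.getD_some]
    rw [hD r j]
    cases hj : PySem.List.pyGet? r j with
    | none => simp [hD, hN1]
    | some q =>
      simp only [Option.getD_some]
      rw [hD q k]
      cases hk : PySem.List.pyGet? q k with
      | none => simp
      | some b => simp

theorem pv_if_or (p : Prop) [Decidable p] (b : Bool) : (if p then true else b) = (decide p || b) := by
  split_ifs <;> simp_all

-- ===== VERDICT =====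
set_option maxHeartbeats 1000000 in
theorem smallTobig_spec : Claim_equal_smallTobig := by
  intro t _ _
  unfold Spec_smallTobig smallTobig smallTobig_alt pvWins2d
  simp only [show PySem.List.pyRange 0 3 1 = [0, 1, 2] from by decide]
  simp only [pvAHoriz, pvAVert, List.any_cons, List.any_nil,
    List.all_cons, List.all_nil,
    show ((2 : Int) - 0) = 2 from by decide, show ((2 : Int) - 1) = 1 from by decide,
    show ((2 : Int) - 2) = 0 from by decide,
    pvCellB_eq,    pv_if_or, Bool.decide_coe,
    Bool.or_false, Bool.and_true, Bool.or_assoc]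
  rw [Bool.eq_iff_iff]
  simp only [Bool.or_eq_true, Bool.and_eq_true]
  constructor
  · rintro (h|h|h|h|h|h|h|h|h|h|h|h|h|h|h|h) <;> simp [h.1.1, h.1.2, h.2]
  · rintro (h|h|h|h|h|h|h|h|h|h|h|h|h|h|h|h|h|h|h|h) <;> simp [h.1, h.2.1, h.2.2]
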